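-- pv_equiv track=rewrite | github.com/rcklomp/multimodel-document-converter | src/mmrag_v2/processor.py | _extract_heading_level
-- ===== SOURCE A (Python) =====
-- from typing import Any, Dict, Generator, List, Optional, Tuple
--
-- def _extract_heading_level(label: str) -> Optional[int]:
--     """Extract heading level from Docling label."""
--     label_lower = label.lower()
--     if "title" in label_lower:
--         return 1
--     elif "section" in label_lower or "heading" in label_lower:
--         for i in range(1, 7):
--             if str(i) in label_lower or f"level{i}" in label_lower:
--                 return i
--         return 2
--     return None
-- ===== SOURCE B (Python) =====
-- def _extract_heading_level(label):
--     """Extract heading level from Docling label."""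
--     ll = label.lower()
--     if "title" in ll:
--         return 1
--     if "section" in ll or "heading" in ll:
--         digits = [ord(c) - ord('0') for c in ll if '1' <= c <= '6']
--         return min(digits) if digits else 2
--     return None
-- ===== Notes on version B (the rewrite author's own statement) =====
-- stated objective: simpler
-- what changed: Replaces the six-iteration loop of repeated substring scans (str(i)/levelN membership tests) with a single pass collecting the digit characters 1-6 and returning their minimum, defaulting to 2.
import Mathlib
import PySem

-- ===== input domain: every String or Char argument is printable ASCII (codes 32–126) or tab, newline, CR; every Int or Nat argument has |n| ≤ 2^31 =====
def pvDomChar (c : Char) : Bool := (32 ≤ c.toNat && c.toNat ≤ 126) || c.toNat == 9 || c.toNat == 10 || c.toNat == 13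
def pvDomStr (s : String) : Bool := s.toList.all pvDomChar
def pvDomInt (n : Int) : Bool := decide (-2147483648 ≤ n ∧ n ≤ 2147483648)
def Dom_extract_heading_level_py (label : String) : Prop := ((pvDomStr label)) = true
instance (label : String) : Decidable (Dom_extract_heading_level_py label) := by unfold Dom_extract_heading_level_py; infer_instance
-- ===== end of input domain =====

-- B replaces A's six repeated substring scans with one pass gathering digits 1..6 and a min reduction (objective: simpler).

-- ===== PORT A =====
-- for i in range(1,7): if str(i) in ll or f"level{i}" in ll: return i / after the loop: return 2
def pyLoopA (ll : String) : List Int → Option Int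
  | [] => none
  | i :: rest =>
    if PySem.Str.isIn (PySem.Int.toStr i) ll || PySem.Str.isIn ("level" ++ PySem.Int.toStr i) ll then
      some i
    else pyLoopA ll rest

def extract_heading_level_py (label : String) : Option Int :=
  let label_lower := PySem.Str.lower label
  if PySem.Str.isIn "title" label_lower then some 1
  else if PySem.Str.isIn "section" label_lower || PySem.Str.isIn "heading" label_lower then
    match pyLoopA label_lower (PySem.List.pyRange 1 7 1) with
    | some i => some i
    | none => some 2
  else none

-- ===== PORT B =====
def extract_heading_level_py_alt (label : String) : Option Int :=
  let ll := PySem.Str.lower label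
  if PySem.Str.isIn "title" ll then some 1
  else if PySem.Str.isIn "section" ll || PySem.Str.isIn "heading" ll then
    let digits := (ll.toList.filter (fun c => '1' ≤ c && c ≤ '6')).map
      (fun c => ((c.toNat : Int) - 48))
    match PySem.List.min? digits (fun x => x) with
    | some m => some m
    | none => some 2
  else none

-- ===== PRECONDITION & SPEC =====
def Spec_extract_heading_level_py (label : String) (out : Option Int) : Prop := out = extract_heading_level_py_alt label
instance (label : String) (out : Option Int) : Decidable (Spec_extract_heading_level_py label out) := by unfold Spec_extract_heading_level_py; infer_instance

-- ===== CLAIM (what is proved, stated in full; the proofs are below) =====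
def Claim_equal_extract_heading_level_py : Prop := ∀ (label : String), Dom_extract_heading_level_py label → Spec_extract_heading_level_py label (extract_heading_level_py label)

-- ===== LEMMAS AND PROOFS =====

-- "levelN" in ll implies "N" in ll, so A's disjunction collapses to the digit test
theorem orlevel (d ll : String) :
    (PySem.Str.isIn d ll || PySem.Str.isIn ("level" ++ d) ll) = PySem.Str.isIn d ll := by
  cases h : PySem.Str.isIn d ll with
  | true => simp
  | false =>
    rw [Bool.false_or]
    simp only [PySem.Str.isIn_eq] at h ⊢
    rw [PySem.Chars.isIn_eq_false_iff] at h ⊢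
    rw [String.toList_append]
    exact fun hc => h ((List.suffix_append _ _).isInfix.trans hc)

-- single-character membership
theorem isIn_single (c : Char) (sub s : String) (hsub : sub.toList = [c]) :
    PySem.Str.isIn sub s = decide (c ∈ s.toList) := by
  rcases h : decide (c ∈ s.toList) with _ | _
  · simp only [decide_eq_false_iff_not] at h
    rw [Bool.eq_false_iff]
    intro hc
    rw [PySem.Str.isIn_iff_infix, hsub] at hc
    exact h (hc.mem (by simp))
  · simp only [decide_eq_true_eq] at h
    rw [PySem.Str.isIn_iff_infix, hsub]
    obtain ⟨l, r, hlr⟩ := List.append_of_mem h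
    rw [hlr]
    exact ⟨l, r, by simp⟩

def dsOf (cs : List Char) : List Int :=
  (cs.filter (fun c => '1' ≤ c && c ≤ '6')).map (fun c => ((c.toNat : Int) - 48))

theorem char_toNat_eq {c d : Char} (h : c.toNat = d.toNat) : c = d :=
  Char.ext (UInt32.toNat_inj.mp h)

theorem mem_dsOf (cs : List Char) (i : Int) :
    i ∈ dsOf cs ↔ ((i = 1 ∧ '1' ∈ cs) ∨ (i = 2 ∧ '2' ∈ cs) ∨ (i = 3 ∧ '3' ∈ cs) ∨
      (i = 4 ∧ '4' ∈ cs) ∨ (i = 5 ∧ '5' ∈ cs) ∨ (i = 6 ∧ '6' ∈ cs)) := by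
  simp only [dsOf, List.mem_map, List.mem_filter, Bool.and_eq_true, decide_eq_true_eq]
  constructor
  · rintro ⟨c, ⟨hc, h1, h6⟩, rfl⟩
    have h1' : (49 : Nat) ≤ c.toNat := h1
    have h6' : c.toNat ≤ 54 := h6
    interval_cases h : c.toNat <;>
      [ exact Or.inl ⟨by omega, (char_toNat_eq h : c = '1') ▸ hc⟩;
        exact Or.inr (Or.inl ⟨by omega, (char_toNat_eq h : c = '2') ▸ hc⟩);
        exact Or.inr (Or.inr (Or.inl ⟨by omega, (char_toNat_eq h : c = '3') ▸ hc⟩));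
        exact Or.inr (Or.inr (Or.inr (Or.inl ⟨by omega, (char_toNat_eq h : c = '4') ▸ hc⟩)));
        exact Or.inr (Or.inr (Or.inr (Or.inr (Or.inl ⟨by omega, (char_toNat_eq h : c = '5') ▸ hc⟩))));
        exact Or.inr (Or.inr (Or.inr (Or.inr (Or.inr ⟨by omega, (char_toNat_eq h : c = '6') ▸ hc⟩))))]
  · rintro (⟨rfl, hm⟩ | ⟨rfl, hm⟩ | ⟨rfl, hm⟩ | ⟨rfl, hm⟩ | ⟨rfl, hm⟩ | ⟨rfl, hm⟩)
    · exact ⟨'1', ⟨hm, by decide, by decide⟩, by decide⟩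
    · exact ⟨'2', ⟨hm, by decide, by decide⟩, by decide⟩
    · exact ⟨'3', ⟨hm, by decide, by decide⟩, by decide⟩
    · exact ⟨'4', ⟨hm, by decide, by decide⟩, by decide⟩
    · exact ⟨'5', ⟨hm, by decide, by decide⟩, by decide⟩
    · exact ⟨'6', ⟨hm, by decide, by decide⟩, by decide⟩

theorem min_dsOf (cs : List Char) (i : Int)
    (hin : i ∈ dsOf cs) (hmin : ∀ j : Int, j ∈ dsOf cs → i ≤ j) :
    PySem.List.min? (dsOf cs) (fun x => x) = some i := by
  cases h : PySem.List.min? (dsOf cs) (fun x => x) with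
  | none =>
    rw [PySem.List.min?_eq_none_iff] at h
    rw [h] at hin; exact absurd hin (List.not_mem_nil)
  | some m =>
    have hmem := PySem.List.min?_mem h
    have h1 : m ≤ i := PySem.List.min?_isMin h i hin
    have h2 : i ≤ m := hmin m hmem
    exact congrArg some (le_antisymm h1 h2)

theorem dsOf_nil (cs : List Char)
    (h : ∀ j : Int, j ∉ dsOf cs) : PySem.List.min? (dsOf cs) (fun x => x) = none := by
  rw [PySem.List.min?_eq_none_iff]
  exact List.eq_nil_iff_forall_not_mem.mpr h

-- ===== VERDICT (by name: the statement is the Claim_ definition above) =====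
set_option maxHeartbeats 1000000 in
theorem extract_heading_level_py_spec : Claim_equal_extract_heading_level_py := by
  intro label _
  unfold Spec_extract_heading_level_py extract_heading_level_py extract_heading_level_py_alt
  set ll := PySem.Str.lower label with hll
  dsimp only
  split_ifs with ht hs
  · rfl
  · -- section/heading branch
    have hr : PySem.List.pyRange 1 7 1 = [1, 2, 3, 4, 5, 6] := by decide
    rw [hr]
    simp only [pyLoopA, orlevel]
    simp only [isIn_single '1' (PySem.Int.toStr 1) ll (by decide),
      isIn_single '2' (PySem.Int.toStr 2) ll (by decide),
      isIn_single '3' (PySem.Int.toStr 3) ll (by decide),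
      isIn_single '4' (PySem.Int.toStr 4) ll (by decide),
      isIn_single '5' (PySem.Int.toStr 5) ll (by decide),
      isIn_single '6' (PySem.Int.toStr 6) ll (by decide)]
    show _ = (match PySem.List.min? (dsOf ll.toList) (fun x => x) with
      | some m => some m | none => some 2)
    by_cases h1 : '1' ∈ ll.toList
    · rw [min_dsOf ll.toList 1 ((mem_dsOf _ _).mpr (Or.inl ⟨rfl, h1⟩))
        (fun j hj => by rcases (mem_dsOf _ _).mp hj with ⟨rfl,_⟩|⟨rfl,_⟩|⟨rfl,_⟩|⟨rfl,_⟩|⟨rfl,_⟩|⟨rfl,_⟩ <;> omega)]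
      simp [h1]
    · by_cases h2 : '2' ∈ ll.toList
      · rw [min_dsOf ll.toList 2 ((mem_dsOf _ _).mpr (Or.inr (Or.inl ⟨rfl, h2⟩)))
          (fun j hj => by rcases (mem_dsOf _ _).mp hj with ⟨rfl,hm⟩|⟨rfl,_⟩|⟨rfl,_⟩|⟨rfl,_⟩|⟨rfl,_⟩|⟨rfl,_⟩ <;> first | omega | exact absurd hm h1)]
        simp [h1, h2]
      · by_cases h3 : '3' ∈ ll.toList
        · rw [min_dsOf ll.toList 3 ((mem_dsOf _ _).mpr (Or.inr (Or.inr (Or.inl ⟨rfl, h3⟩))))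
            (fun j hj => by rcases (mem_dsOf _ _).mp hj with ⟨rfl,hm⟩|⟨rfl,hm⟩|⟨rfl,_⟩|⟨rfl,_⟩|⟨rfl,_⟩|⟨rfl,_⟩ <;> first | omega | exact absurd hm h1 | exact absurd hm h2)]
          simp [h1, h2, h3]
        · by_cases h4 : '4' ∈ ll.toList
          · rw [min_dsOf ll.toList 4 ((mem_dsOf _ _).mpr (Or.inr (Or.inr (Or.inr (Or.inl ⟨rfl, h4⟩)))))
              (fun j hj => by rcases (mem_dsOf _ _).mp hj with ⟨rfl,hm⟩|⟨rfl,hm⟩|⟨rfl,hm⟩|⟨rfl,_⟩|⟨rfl,_⟩|⟨rfl,_⟩ <;> first | omega | exact absurd hm h1 | exact absurd hm h2 | exact absurd hm h3)]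
            simp [h1, h2, h3, h4]
          · by_cases h5 : '5' ∈ ll.toList
            · rw [min_dsOf ll.toList 5 ((mem_dsOf _ _).mpr (Or.inr (Or.inr (Or.inr (Or.inr (Or.inl ⟨rfl, h5⟩))))))
                (fun j hj => by rcases (mem_dsOf _ _).mp hj with ⟨rfl,hm⟩|⟨rfl,hm⟩|⟨rfl,hm⟩|⟨rfl,hm⟩|⟨rfl,_⟩|⟨rfl,_⟩ <;> first | omega | exact absurd hm h1 | exact absurd hm h2 | exact absurd hm h3 | exact absurd hm h4)]
              simp [h1, h2, h3, h4, h5]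
            · by_cases h6 : '6' ∈ ll.toList
              · rw [min_dsOf ll.toList 6 ((mem_dsOf _ _).mpr (Or.inr (Or.inr (Or.inr (Or.inr (Or.inr ⟨rfl, h6⟩))))))
                  (fun j hj => by rcases (mem_dsOf _ _).mp hj with ⟨rfl,hm⟩|⟨rfl,hm⟩|⟨rfl,hm⟩|⟨rfl,hm⟩|⟨rfl,hm⟩|⟨rfl,_⟩ <;> first | omega | exact absurd hm h1 | exact absurd hm h2 | exact absurd hm h3 | exact absurd hm h4 | exact absurd hm h5)]
                simp [h1, h2, h3, h4, h5, h6]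
              · rw [dsOf_nil ll.toList
                  (fun j hj => by rcases (mem_dsOf _ _).mp hj with ⟨_,hm⟩|⟨_,hm⟩|⟨_,hm⟩|⟨_,hm⟩|⟨_,hm⟩|⟨_,hm⟩ <;> first | exact absurd hm h1 | exact absurd hm h2 | exact absurd hm h3 | exact absurd hm h4 | exact absurd hm h5 | exact absurd hm h6)]
                simp [h1, h2, h3, h4, h5, h6]
  · rfl
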